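-- pv_equiv track=rewrite | github.com/purushottam-saha/Rummy | rummy/strats/strat_mindistopp.py | related_cards2
-- ===== SOURCE A (Python) =====
-- def related_cards(card:int):
--     if card==52:
--         return []
--     rel = [card,card-1,card+1,]
--     rel = rel + [card%13+13*i for i in range(4)]
--     return rel
--
-- def related_cards2(cards:list,total_cards:list):
--     rel = []
--     for c in cards:
--         rel = rel + related_cards(c)
--     out1 = [] # related cards thhat are present
--     out2 = [] # non-related cards thhat are present
--     for c in total_cards:
--         if c in rel:
--             out1.append(c)
--         else:
--             out2.append(c)
--     return out1,out2
-- ===== SOURCE B (Python) =====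
-- def related_cards2(cards: list, total_cards: list):
--     srcs = {c for c in cards if c != 52}
--     ranks = {c % 13 for c in srcs}
--     def related(c):
--         return c in srcs or c + 1 in srcs or c - 1 in srcs or (0 <= c <= 51 and c % 13 in ranks)
--     out1 = [c for c in total_cards if related(c)]
--     out2 = [c for c in total_cards if not related(c)]
--     return out1, out2
-- ===== Notes on version B (the rewrite author's own statement) =====
-- stated objective: faster
-- what changed: A concatenates every source card's expansion into one big 'rel' list and does a linear 'c in rel' scan per target; B builds a source set and a rank set once and classifies each target by O(1)-style direct membership tests (c, c+1, c-1 in sources, or 0<=c<=51 with matching rank), with two filter passes instead of A's two-accumulator loop.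
import Mathlib
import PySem

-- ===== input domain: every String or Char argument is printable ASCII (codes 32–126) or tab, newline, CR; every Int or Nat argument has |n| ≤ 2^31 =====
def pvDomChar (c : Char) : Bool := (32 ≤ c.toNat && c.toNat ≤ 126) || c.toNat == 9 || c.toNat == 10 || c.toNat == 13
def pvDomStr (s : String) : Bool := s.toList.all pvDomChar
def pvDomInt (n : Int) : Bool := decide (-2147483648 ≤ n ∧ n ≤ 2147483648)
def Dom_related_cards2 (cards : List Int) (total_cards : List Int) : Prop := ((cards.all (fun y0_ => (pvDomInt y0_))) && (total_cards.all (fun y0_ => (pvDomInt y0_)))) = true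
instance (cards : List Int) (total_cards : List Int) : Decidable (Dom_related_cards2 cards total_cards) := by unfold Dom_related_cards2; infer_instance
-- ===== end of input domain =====

-- B replaces A's quadratic expand-then-scan (build one big list of every related card, then
-- 'c in rel' per target) by direct per-target membership tests against a source set and a rank set.

-- ===== PORT A =====
def related_cards (card : Int) : List Int :=
  if card = 52 then []
  else
    let rel : List Int := [card, card - 1, card + 1]
    rel ++ (PySem.List.pyRange 0 4 1).map (fun i => PySem.Int.mod card 13 + 13 * i)

def related_cards2 (cards : List Int) (total_cards : List Int) : List Int × List Int :=
  let rel : List Int := cards.foldl (fun acc c => acc ++ related_cards c) []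
  let p := total_cards.foldl
    (fun (p : List Int × List Int) c =>
      if c ∈ rel then (p.1 ++ [c], p.2) else (p.1, p.2 ++ [c])) ([], [])
  (p.1, p.2)

-- ===== PORT B =====
def relatedB (srcs ranks : PySem.Set Int) (c : Int) : Bool :=
  srcs.contains c || srcs.contains (c + 1) || srcs.contains (c - 1)
    || (decide (0 ≤ c) && decide (c ≤ 51) && ranks.contains (PySem.Int.mod c 13))

def related_cards2_alt (cards : List Int) (total_cards : List Int) : List Int × List Int :=
  let srcs : PySem.Set Int := PySem.Set.ofList (cards.filter (fun c => c ≠ 52))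
  let ranks : PySem.Set Int := PySem.Set.ofList (srcs.map (fun c => PySem.Int.mod c 13))
  let out1 := total_cards.filter (fun c => relatedB srcs ranks c)
  let out2 := total_cards.filter (fun c => !(relatedB srcs ranks c))
  (out1, out2)

-- ===== PRECONDITION & SPEC =====
def Spec_related_cards2 (cards : List Int) (total_cards : List Int) (out : List Int × List Int) : Prop := out = related_cards2_alt cards total_cards
instance (cards : List Int) (total_cards : List Int) (out : List Int × List Int) : Decidable (Spec_related_cards2 cards total_cards out) := by unfold Spec_related_cards2; infer_instance

-- ===== CLAIM (what is proved, stated in full; the proofs are below) =====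
def Claim_equal_related_cards2 : Prop := ∀ (cards : List Int) (total_cards : List Int), Dom_related_cards2 cards total_cards → Spec_related_cards2 cards total_cards (related_cards2 cards total_cards)

-- ===== LEMMAS AND PROOFS =====

-- A loop that appends each element to one of two accumulators is a pair of filters.
theorem foldl_split {q : Int → Prop} [DecidablePred q] (xs l1 l2 : List Int) :
    xs.foldl (fun (p : List Int × List Int) c =>
        if q c then (p.1 ++ [c], p.2) else (p.1, p.2 ++ [c])) (l1, l2)
      = (l1 ++ xs.filter (fun c => decide (q c)),
         l2 ++ xs.filter (fun c => !decide (q c))) := by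
  induction xs generalizing l1 l2 with
  | nil => simp
  | cons x xs ih =>
    by_cases h : q x <;> simp [h, ih]

-- Membership in A's expansion of one source card.
theorem mem_related_cards (a c : Int) :
    c ∈ related_cards a ↔
      a ≠ 52 ∧ (c = a ∨ c = a - 1 ∨ c = a + 1 ∨
        (0 ≤ c ∧ c ≤ 51 ∧ PySem.Int.mod c 13 = PySem.Int.mod a 13)) := by
  have hr : PySem.List.pyRange 0 4 1 = [0, 1, 2, 3] := by decide
  have hm : PySem.Int.mod a 13 = a % 13 :=
    PySem.Int.mod_eq_emod_of_pos (by norm_num : (0:Int) < 13)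
  have hmc : PySem.Int.mod c 13 = c % 13 :=
    PySem.Int.mod_eq_emod_of_pos (by norm_num : (0:Int) < 13)
  unfold related_cards
  by_cases h : a = 52
  · simp [h]
  · simp only [h, if_neg, ne_eq, not_false_eq_true, true_and, hr, hm, hmc,
      List.map_cons, List.map_nil, List.mem_append, List.mem_cons, List.not_mem_nil, or_false]
    omega

-- B's test agrees with membership in A's accumulated relation list.
theorem relatedB_eq (cards : List Int) (c : Int) :
    relatedB (PySem.Set.ofList (cards.filter (fun c => c ≠ 52)))
        (PySem.Set.ofList ((PySem.Set.ofList (cards.filter (fun c => c ≠ 52))).map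
          (fun c => PySem.Int.mod c 13))) c
      = decide (c ∈ cards.foldl (fun acc c => acc ++ related_cards c) []) := by
  rw [Bool.eq_iff_iff, decide_eq_true_eq,
    PySem.List.foldl_append_eq_flatMap, List.nil_append, List.mem_flatMap]
  unfold relatedB
  simp only [Bool.or_eq_true, Bool.and_eq_true, decide_eq_true_eq,
    PySem.Set.contains_iff, PySem.Set.mem_ofList, List.mem_map,
    List.mem_filter, ne_eq, decide_eq_true_eq, mem_related_cards]
  constructor
  · rintro (((⟨hc, h52⟩ | ⟨hc, h52⟩) | ⟨hc, h52⟩) | ⟨⟨h0, h51⟩, a, ⟨ha, ha52⟩, hmm⟩)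
    · exact ⟨c, hc, h52, Or.inl rfl⟩
    · exact ⟨c + 1, hc, h52, Or.inr (Or.inl (by ring))⟩
    · exact ⟨c - 1, hc, h52, Or.inr (Or.inr (Or.inl (by ring)))⟩
    · exact ⟨a, ha, ha52, Or.inr (Or.inr (Or.inr ⟨h0, h51, hmm.symm⟩))⟩
  · rintro ⟨a, ha, h52, hc | hc | hc | ⟨h0, h51, hmm⟩⟩
    · exact Or.inl (Or.inl (Or.inl ⟨hc ▸ ha, hc ▸ h52⟩))
    · refine Or.inl (Or.inl (Or.inr ⟨?_, ?_⟩)) <;> rw [show c + 1 = a by omega] <;> assumption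
    · refine Or.inl (Or.inr ⟨?_, ?_⟩) <;> rw [show c - 1 = a by omega] <;> assumption
    · exact Or.inr ⟨⟨h0, h51⟩, a, ⟨ha, h52⟩, hmm.symm⟩

-- ===== VERDICT (by name: the statement is the Claim_ definition above) =====
theorem related_cards2_spec : Claim_equal_related_cards2 := by
  intro cards total_cards _
  unfold Spec_related_cards2 related_cards2 related_cards2_alt
  simp only []
  rw [foldl_split (q := fun c => c ∈ cards.foldl (fun acc c => acc ++ related_cards c) [])]
  simp only [List.nil_append, Prod.mk.injEq]
  constructor <;>
  · refine List.filter_congr (fun c _ => ?_)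
    rw [relatedB_eq]
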